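-- pv_equiv track=rewrite | github.com/K-MarkLee/Coding_Test | 프로그래머스/0/181921. 배열 만들기 2/배열 만들기 2.py | solution
-- ===== SOURCE A (Python) =====
-- from itertools import product
--
-- def solution(l, r):
--     result = set()
--
--     max_len= len(str(r))
--
--     for i in range(1, max_len+1):
--         for j in product(['0','5'], repeat = i):
--             num = int("".join(j))
--
--             if l <= num <=r :
--                 result.add(num)
--
--     if not result:
--         return [-1]
--     else:
--         return sorted(list(result))
-- ===== SOURCE B (Python) =====
-- def solution(l, r):
--     vals = [0]
--     level = [5]
--     while level:
--         vals = vals + level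
--         level = [10 * x + d for x in level for d in (0, 5) if 10 * x + d <= r]
--     res = [v for v in vals if l <= v <= r]
--     return res if res else [-1]
-- ===== Notes on version B (the rewrite author's own statement) =====
-- stated objective: alternative
-- what changed: A enumerates digit-strings with itertools.product for every length up to len(str(r)), parses each via int(join), deduplicates in a set and sorts; B generates the 0/5-digit numbers purely numerically level by level (x -> 10x, 10x+5), pruning branches above r, so the list is produced deduplicated and already in ascending order with no string work, no set and no sort.
import Mathlib
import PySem

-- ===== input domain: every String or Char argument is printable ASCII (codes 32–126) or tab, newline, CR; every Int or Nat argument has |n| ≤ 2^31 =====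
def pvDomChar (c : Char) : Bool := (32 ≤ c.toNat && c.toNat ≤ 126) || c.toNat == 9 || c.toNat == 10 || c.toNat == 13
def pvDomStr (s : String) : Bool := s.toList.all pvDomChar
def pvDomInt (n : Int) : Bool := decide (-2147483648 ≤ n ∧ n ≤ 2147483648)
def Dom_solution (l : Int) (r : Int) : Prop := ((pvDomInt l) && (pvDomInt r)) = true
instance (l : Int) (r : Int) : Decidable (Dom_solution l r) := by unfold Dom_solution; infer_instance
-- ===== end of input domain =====

-- B replaces A's string-based digit-combination enumeration (itertools.product + int("".join) + set + sorted)
-- by a purely numeric level-by-level generation of the 0/5-digit numbers, produced already in ascending order.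

-- ===== PORT A =====
-- itertools.product(['0','5'], repeat=i), in product order (first coordinate slowest)
def pvProdA : Nat → List (List String)
  | 0 => [[]]
  | n+1 => (["0", "5"]).flatMap (fun x => (pvProdA n).map (fun rest => x :: rest))

-- num = int("".join(j)); int() never raises here (j is a nonempty list of digit strings), so .getD 0 is never taken
def pvJoinVal (j : List String) : Int := (PySem.Int.ofStr? (PySem.Str.join "" j)).getD 0

def solution (l : Int) (r : Int) : List Int :=
  let result : PySem.Set Int := PySem.Set.empty
  let maxLen : Int := PySem.Str.len (PySem.Int.toStr r)
  let result := (PySem.List.pyRange 1 (maxLen + 1) 1).foldl (fun result i =>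
    (pvProdA i.toNat).foldl (fun result j =>
      let num : Int := pvJoinVal j
      if l ≤ num ∧ num ≤ r then PySem.Set.add result num else result) result) result
  if result = [] then [-1] else PySem.List.sorted result (fun x => x) false

-- ===== PORT B =====
-- the while loop of Source B; fuel 12 is never exhausted for |r| ≤ 2^31 (level k holds only numbers ≥ 5·10^k)
def pvBLoop (fuel : Nat) (r : Int) (vals : List Int) (level : List Int) : List Int :=
  match fuel with
  | 0 => vals
  | fuel+1 =>
    if level.isEmpty then vals
    else pvBLoop fuel r (vals ++ level)
      (level.flatMap (fun x => ([0, 5] : List Int).filterMap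
        (fun d => if 10*x + d ≤ r then some (10*x + d) else none)))

def solution_alt (l : Int) (r : Int) : List Int :=
  let vals := pvBLoop 12 r [0] [5]
  let res := vals.filter (fun v => decide (l ≤ v) && decide (v ≤ r))
  if res.isEmpty then [-1] else res

-- ===== PRECONDITION & SPEC =====
def Spec_solution (l : Int) (r : Int) (out : List Int) : Prop := out = solution_alt l r
instance (l : Int) (r : Int) (out : List Int) : Decidable (Spec_solution l r out) := by unfold Spec_solution; infer_instance

-- ===== CLAIM (what is proved, stated in full; the proofs are below) =====
def Claim_equal_solution : Prop := ∀ (l : Int) (r : Int), Dom_solution l r → Spec_solution l r (solution l r)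

-- ===== LEMMAS AND PROOFS =====

-- "all decimal digits are 0 or 5" on naturals
def pvOkF : Nat → Nat → Bool
  | 0, _ => true
  | _+1, 0 => true
  | f+1, n+1 => (decide ((n+1) % 10 = 0) || decide ((n+1) % 10 = 5)) && pvOkF f ((n+1) / 10)

def pvOk (n : Nat) : Bool := pvOkF n n

lemma pvOkF_irrel (f : Nat) : ∀ f' n, n ≤ f → n ≤ f' → pvOkF f n = pvOkF f' n := by
  induction f with
  | zero =>
    intro f' n h1 _
    interval_cases n
    cases f' <;> rfl
  | succ f ih =>
    intro f' n h1 h2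
    cases n with
    | zero => cases f' <;> rfl
    | succ m =>
      obtain ⟨f'', rfl⟩ : ∃ f'', f' = f'' + 1 := ⟨f' - 1, by omega⟩
      show (_ && pvOkF f ((m+1) / 10)) = (_ && pvOkF f'' ((m+1) / 10))
      rw [ih f'' ((m+1) / 10) (by omega) (by omega)]

-- numeric mirror of the values of pvProdA i
def pvW : Nat → List Int
  | 0 => [0]
  | n+1 => ([0, 5] : List Int).flatMap (fun d => (pvW n).map (fun w => d * 10 ^ n + w))

-- B's unpruned level k (numbers with k+1 digits, leading digit 5, all digits 0/5, ascending)
def pvLv : Nat → List Int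
  | 0 => [5]
  | k+1 => (pvLv k).flatMap (fun x => [10 * x, 10 * x + 5])

-- closed form of B's loop state: the pruned levels from k on, with fuel f
def pvAcc : Nat → Nat → Int → List Int
  | 0, _, _ => []
  | f+1, k, r =>
    let cur := (pvLv k).filter (fun v => decide (v ≤ r))
    if cur.isEmpty then [] else cur ++ pvAcc f (k+1) r

lemma pvPow_pos (n : Nat) : (0:Int) < 10 ^ n := pow_pos (by norm_num) n

lemma pvPow_mono {a b : Nat} (h : a ≤ b) : (10:Int) ^ a ≤ 10 ^ b := by
  exact pow_le_pow_right₀ (by norm_num) h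

lemma pvPow_castN (n : Nat) : ((10 ^ n : Nat) : Int) = 10 ^ n := by push_cast; ring

lemma pvOk_step (n : Nat) (h : n ≠ 0) :
    pvOk n = ((decide (n % 10 = 0) || decide (n % 10 = 5)) && pvOk (n / 10)) := by
  cases n with
  | zero => exact absurd rfl h
  | succ m =>
    show pvOkF (m+1) (m+1) = _
    show (_ && pvOkF m ((m+1) / 10)) = _
    rw [pvOkF_irrel m ((m+1)/10) ((m+1)/10) (by omega) (by omega)]
    rfl

lemma pvOk_mul10 (x : Nat) (d : Nat) (hx : 0 < x) (hd : d = 0 ∨ d = 5) :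
    pvOk (10 * x + d) = pvOk x := by
  have h0 : 10 * x + d ≠ 0 := by omega
  rw [pvOk_step _ h0]
  have hm : (10 * x + d) % 10 = d := by omega
  have hdv : (10 * x + d) / 10 = x := by omega
  rcases hd with rfl | rfl <;> simp [hm, hdv]

lemma pvOk_5pow (n : Nat) : ∀ w : Nat, w < 10 ^ n → pvOk (5 * 10 ^ n + w) = pvOk w := by
  induction n with
  | zero =>
    intro w hw
    interval_cases w
    decide
  | succ n ih =>
    intro w hw
    have hp : 0 < 10 ^ n := Nat.pow_pos (show 0 < 10 by omega)
    have hs : 10 ^ (n+1) = 10 * 10 ^ n := by ring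
    have h0 : 5 * 10 ^ (n+1) + w ≠ 0 := by omega
    rw [pvOk_step _ h0]
    have hm : (5 * 10 ^ (n+1) + w) % 10 = w % 10 := by rw [hs]; omega
    have hdv : (5 * 10 ^ (n+1) + w) / 10 = 5 * 10 ^ n + w / 10 := by rw [hs]; omega
    rw [hm, hdv, ih (w / 10) (by rw [hs] at hw; omega)]
    by_cases hw0 : w = 0
    · subst hw0; simp
    · rw [pvOk_step w hw0]

lemma pvOk_top (n : Nat) : ∀ v : Nat, v < 10 ^ (n+1) → pvOk v = true →
    v < 10 ^ n ∨ (5 * 10 ^ n ≤ v ∧ v < 6 * 10 ^ n) := by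
  induction n with
  | zero =>
    intro v hv hok
    by_cases h0 : v = 0
    · left; omega
    · rw [pvOk_step v h0] at hok
      simp only [Bool.and_eq_true, Bool.or_eq_true, decide_eq_true_eq] at hok
      have : v % 10 = v := by omega
      omega
  | succ n ih =>
    intro v hv hok
    have hp : 0 < 10 ^ n := Nat.pow_pos (show 0 < 10 by omega)
    have hs1 : 10 ^ (n+1) = 10 * 10 ^ n := by ring
    have hs2 : 10 ^ (n+2) = 10 * 10 ^ (n+1) := by ring
    by_cases h0 : v = 0
    · left; rw [hs1]; omega
    · rw [pvOk_step v h0] at hok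
      simp only [Bool.and_eq_true, Bool.or_eq_true, decide_eq_true_eq] at hok
      have hvd : v / 10 < 10 ^ (n+1) := by rw [hs2] at hv; omega
      rcases ih (v / 10) hvd hok.2 with h | h
      · left; rw [hs1]; omega
      · right; rw [hs1] at *; omega

lemma pvW_succ (n : Nat) : pvW (n+1) = pvW n ++ (pvW n).map (fun w => 5 * 10 ^ n + w) := by
  show ([0, 5] : List Int).flatMap (fun d => (pvW n).map (fun w => d * 10 ^ n + w)) = _
  simp [List.flatMap_cons]

lemma mem_pvW (n : Nat) : ∀ v : Int, v ∈ pvW n ↔ 0 ≤ v ∧ v < 10 ^ n ∧ pvOk v.toNat = true := by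
  induction n with
  | zero =>
    intro v
    show v ∈ [(0:Int)] ↔ _
    simp only [List.mem_singleton, pow_zero]
    constructor
    · rintro rfl; exact ⟨le_refl _, by norm_num, by decide⟩
    · rintro ⟨h1, h2, _⟩; omega
  | succ n ih =>
    intro v
    have hp := pvPow_pos n
    have hc := pvPow_castN n
    have hs : (10:Int) ^ (n+1) = 10 * 10 ^ n := by ring
    rw [pvW_succ]
    simp only [List.mem_append, List.mem_map, ih]
    constructor
    · rintro (⟨h1, h2, h3⟩ | ⟨w, ⟨h1, h2, h3⟩, rfl⟩)
      · exact ⟨h1, by omega, h3⟩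
      · refine ⟨by omega, by omega, ?_⟩
        have e1 : (5 * 10 ^ n + w).toNat = 5 * 10 ^ n + w.toNat := by omega
        have e2 : w.toNat < 10 ^ n := by omega
        rw [e1, pvOk_5pow n w.toNat e2, h3]
    · rintro ⟨h1, h2, h3⟩
      have hvn : v.toNat < 10 ^ (n+1) := by
        have : ((10 ^ (n+1) : Nat) : Int) = 10 ^ (n+1) := pvPow_castN (n+1)
        omega
      rcases pvOk_top n v.toNat hvn h3 with h | h
      · left; exact ⟨h1, by omega, h3⟩
      · right
        refine ⟨v - 5 * 10 ^ n, ⟨by omega, by omega, ?_⟩, by ring⟩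
        have e1 : v.toNat = 5 * 10 ^ n + (v - 5 * 10 ^ n).toNat := by omega
        have e2 : (v - 5 * 10 ^ n).toNat < 10 ^ n := by omega
        rw [e1, pvOk_5pow n _ e2] at h3
        exact h3

lemma mem_pvLv (k : Nat) : ∀ v : Int,
    v ∈ pvLv k ↔ 5 * 10 ^ k ≤ v ∧ v < 10 ^ (k+1) ∧ pvOk v.toNat = true := by
  induction k with
  | zero =>
    intro v
    show v ∈ [(5:Int)] ↔ _
    simp only [List.mem_singleton, pow_zero, pow_one]
    constructor
    · rintro rfl; exact ⟨by norm_num, by norm_num, by decide⟩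
    · rintro ⟨h1, h2, h3⟩
      have h0 : v.toNat ≠ 0 := by omega
      rw [pvOk_step _ h0] at h3
      simp only [Bool.and_eq_true, Bool.or_eq_true, decide_eq_true_eq] at h3
      have : v.toNat % 10 = v.toNat := by omega
      omega
  | succ k ih =>
    intro v
    have hp := pvPow_pos k
    have hc := pvPow_castN k
    have hs1 : (10:Int) ^ (k+1) = 10 * 10 ^ k := by ring
    have hs2 : (10:Int) ^ (k+2) = 10 * 10 ^ (k+1) := by ring
    show v ∈ (pvLv k).flatMap (fun x => [10 * x, 10 * x + 5]) ↔ _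
    simp only [List.mem_flatMap, List.mem_cons, List.mem_singleton, List.not_mem_nil, or_false]
    constructor
    · rintro ⟨x, hx, hv⟩
      rcases (ih x).mp hx with ⟨h1, h2, h3⟩
      have hx0 : 0 < x.toNat := by omega
      rcases hv with rfl | rfl
      · have e : (10 * x).toNat = 10 * x.toNat + 0 := by omega
        refine ⟨by omega, by omega, ?_⟩
        rw [e, pvOk_mul10 x.toNat 0 hx0 (Or.inl rfl), h3]
      · have e : (10 * x + 5).toNat = 10 * x.toNat + 5 := by omega
        refine ⟨by omega, by omega, ?_⟩
        rw [e, pvOk_mul10 x.toNat 5 hx0 (Or.inr rfl), h3]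
    · rintro ⟨h1, h2, h3⟩
      have h0 : v.toNat ≠ 0 := by omega
      rw [pvOk_step _ h0] at h3
      simp only [Bool.and_eq_true, Bool.or_eq_true, decide_eq_true_eq] at h3
      refine ⟨((v.toNat / 10 : Nat) : Int), ?_, ?_⟩
      · apply (ih _).mpr
        have e : (((v.toNat / 10 : Nat) : Int)).toNat = v.toNat / 10 := Int.toNat_natCast _
        refine ⟨by omega, by omega, ?_⟩
        rw [e]; exact h3.2
      · omega

lemma pvChild_pairwise (L : List Int) (hpw : L.Pairwise (· < ·)) (hpos : ∀ x ∈ L, 0 < x) :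
    (L.flatMap fun x => [10 * x, 10 * x + 5]).Pairwise (· < ·) := by
  induction L with
  | nil => simp
  | cons x L ih =>
    rw [List.pairwise_cons] at hpw
    have hx : 0 < x := hpos x (by simp)
    simp only [List.flatMap_cons]
    rw [show ([10 * x, 10 * x + 5] : List Int) ++ L.flatMap (fun x => [10 * x, 10 * x + 5])
        = [10 * x, 10 * x + 5] ++ L.flatMap (fun x => [10 * x, 10 * x + 5]) from rfl,
      List.pairwise_append]
    refine ⟨by simp, ih hpw.2 (fun y hy => hpos y (by simp [hy])), ?_⟩
    intro a ha b hb
    simp only [List.mem_cons, List.mem_singleton, List.not_mem_nil, or_false] at ha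
    simp only [List.mem_flatMap, List.mem_cons, List.mem_singleton, List.not_mem_nil, or_false] at hb
    obtain ⟨y, hy, hby⟩ := hb
    have hxy : x < y := hpw.1 y hy
    rcases ha with rfl | rfl <;> rcases hby with rfl | rfl <;> omega

lemma pvLv_pairwise (k : Nat) : (pvLv k).Pairwise (· < ·) := by
  induction k with
  | zero => simp [pvLv]
  | succ k ih =>
    show ((pvLv k).flatMap fun x => [10 * x, 10 * x + 5]).Pairwise (· < ·)
    refine pvChild_pairwise _ ih (fun x hx => ?_)
    have := (mem_pvLv k x).mp hx
    have := pvPow_pos k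
    omega

lemma pvLv_head (k : Nat) : ∃ t, pvLv k = (5 * 10 ^ k : Int) :: t := by
  induction k with
  | zero => exact ⟨[], by norm_num [pvLv]⟩
  | succ k ih =>
    obtain ⟨t, ht⟩ := ih
    refine ⟨(10 * (5 * 10 ^ k) + 5) :: t.flatMap (fun x => [10 * x, 10 * x + 5]), ?_⟩
    show (pvLv k).flatMap (fun x => [10 * x, 10 * x + 5]) = _
    rw [ht, List.flatMap_cons]
    have : (10 : Int) * (5 * 10 ^ k) = 5 * 10 ^ (k+1) := by ring
    rw [List.cons_append, List.cons_append, List.nil_append, this]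

set_option maxRecDepth 100000 in
set_option maxHeartbeats 4000000 in
lemma pvProdA_vals (i : Nat) (h : i ≤ 10) : (pvProdA i).map pvJoinVal = pvW i := by
  interval_cases i <;> decide

-- A's set-building loops, flattened
lemma pvFoldl_addif (p : Int → Prop) [DecidablePred p] (f : List String → Int)
    (xs : List (List String)) : ∀ s : PySem.Set Int,
    xs.foldl (fun s j => if p (f j) then PySem.Set.add s (f j) else s) s
      = PySem.Set.update s ((xs.map f).filter (fun v => decide (p v))) := by
  induction xs with
  | nil => intro s; simp [PySem.Set.update]
  | cons j xs ih =>
    intro s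
    by_cases hp : p (f j) <;>
      simp [List.foldl_cons, hp, ih, PySem.Set.update]

lemma pvFoldl_update (g : Int → List Int) (ys : List Int) :
    ∀ s : PySem.Set Int, ys.foldl (fun s i => PySem.Set.update s (g i)) s
      = PySem.Set.update s (ys.flatMap g) := by
  induction ys with
  | nil => intro s; simp [PySem.Set.update]
  | cons y ys ih =>
    intro s
    rw [List.foldl_cons, ih, List.flatMap_cons]
    simp [PySem.Set.update, List.foldl_append]

-- lower bound for the decimal length: n < 10^len(str(n))
lemma pvToDigitsCore_lb (f : Nat) : ∀ (n : Nat) (l : List Char), n < f →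
    n < 10 ^ ((Nat.toDigitsCore 10 f n l).length - l.length)
      ∧ l.length < (Nat.toDigitsCore 10 f n l).length := by
  induction f with
  | zero => intro n l h; omega
  | succ f ih =>
    intro n l h
    simp only [Nat.toDigitsCore]
    by_cases h0 : n / 10 = 0
    · simp only [h0, if_pos rfl]
      constructor
      · simpa using by omega
      · simp
    · rw [if_neg h0]
      have hlt : n / 10 < f := by omega
      obtain ⟨h1, h2⟩ := ih (n / 10) (Nat.digitChar (n % 10) :: l) hlt
      simp only [List.length_cons] at h1 h2
      set L := (Nat.toDigitsCore 10 f (n / 10) (Nat.digitChar (n % 10) :: l)).length with hL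
      refine ⟨?_, by omega⟩
      have e : L - l.length = (L - (l.length + 1)) + 1 := by omega
      rw [e, pow_succ]
      have hA : 0 < 10 ^ (L - (l.length + 1)) := Nat.pow_pos (show 0 < 10 by omega)
      have : n ≤ 10 * (n / 10) + 9 := by omega
      have hstep : n / 10 + 1 ≤ 10 ^ (L - (l.length + 1)) := h1
      nlinarith

lemma pvToDigits_lb (n : Nat) : n < 10 ^ (Nat.toDigits 10 n).length := by
  have := (pvToDigitsCore_lb (n+1) n [] (by omega)).1
  simpa [Nat.toDigits] using this

lemma pvToDigits_pos (n : Nat) : 0 < (Nat.toDigits 10 n).length := by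
  have := (pvToDigitsCore_lb (n+1) n [] (by omega)).2
  simpa [Nat.toDigits] using this

-- B's level step on a pruned level
lemma pvNext_gen (r : Int) (L : List Int) (hpos : ∀ x ∈ L, 0 < x) :
    ((L.filter (fun v => decide (v ≤ r))).flatMap fun x => ([0, 5] : List Int).filterMap
        (fun d => if 10*x + d ≤ r then some (10*x + d) else none))
      = (L.flatMap fun x => [10 * x, 10 * x + 5]).filter (fun v => decide (v ≤ r)) := by
  induction L with
  | nil => simp
  | cons x L ih =>
    have hx : 0 < x := hpos x (by simp)
    have ih' := ih (fun y hy => hpos y (by simp [hy]))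
    by_cases hxr : x ≤ r
    · simp only [List.filter_cons, decide_eq_true_eq, hxr, if_pos, List.flatMap_cons,
        List.filter_append, ih']
      congr 1
      by_cases h1 : 10 * x ≤ r <;> by_cases h2 : 10 * x + 5 ≤ r <;>
        simp [List.filterMap, h1, h2] <;> omega
    · have h1 : ¬ (10 * x ≤ r) := by omega
      have h2 : ¬ (10 * x + 5 ≤ r) := by omega
      simp [List.filter_cons, List.flatMap_cons, List.filter_append, hxr, h1, h2, ih']

lemma pvNext_level (r : Int) (k : Nat) :
    (((pvLv k).filter (fun v => decide (v ≤ r))).flatMap fun x => ([0, 5] : List Int).filterMap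
        (fun d => if 10*x + d ≤ r then some (10*x + d) else none))
      = (pvLv (k+1)).filter (fun v => decide (v ≤ r)) := by
  have := pvNext_gen r (pvLv k) (fun x hx => by
    have := (mem_pvLv k x).mp hx
    have := pvPow_pos k
    omega)
  rw [this]
  rfl

lemma pvBLoop_acc (f : Nat) : ∀ (k : Nat) (r : Int) (vals : List Int),
    pvBLoop f r vals ((pvLv k).filter (fun v => decide (v ≤ r))) = vals ++ pvAcc f k r := by
  induction f with
  | zero => intro k r vals; exact (List.append_nil vals).symm
  | succ f ih =>
    intro k r vals
    show (if ((pvLv k).filter (fun v => decide (v ≤ r))).isEmpty then vals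
        else pvBLoop f r (vals ++ (pvLv k).filter (fun v => decide (v ≤ r)))
          (((pvLv k).filter (fun v => decide (v ≤ r))).flatMap (fun x => ([0, 5] : List Int).filterMap
            (fun d => if 10*x + d ≤ r then some (10*x + d) else none)))) = _
    by_cases he : ((pvLv k).filter (fun v => decide (v ≤ r))).isEmpty
    · rw [if_pos he, pvAcc, if_pos he, List.append_nil]
    · rw [if_neg he, pvNext_level r k, ih (k+1) r, pvAcc, if_neg he, List.append_assoc]

lemma pvAcc_empty_chain (r : Int) (k : Nat)
    (h : (pvLv k).filter (fun v => decide (v ≤ r)) = []) :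
    ∀ j : Nat, (pvLv (k+j)).filter (fun v => decide (v ≤ r)) = [] := by
  intro j
  induction j with
  | zero => simpa using h
  | succ j ih =>
    rw [List.filter_eq_nil_iff] at ih ⊢
    intro v hv
    obtain ⟨t, ht⟩ := pvLv_head (k+j)
    have hhd : (5 * 10 ^ (k+j) : Int) ∈ pvLv (k+j) := by rw [ht]; exact List.mem_cons_self ..
    have h1 := ih _ hhd
    have h2 := (mem_pvLv (k+j+1) v).mp (by rw [show k+j+1 = k+(j+1) by omega]; exact hv)
    have hm : (10:Int) ^ (k+j) ≤ 10 ^ (k+j+1) := pvPow_mono (by omega)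
    have := pvPow_pos (k+j)
    simp only [decide_eq_true_eq] at h1 ⊢
    omega

lemma pvAcc_sub (f : Nat) : ∀ (k : Nat) (r : Int) (v : Int),
    v ∈ pvAcc f k r → v ≤ r ∧ ∃ j : Nat, v ∈ pvLv (k+j) := by
  induction f with
  | zero => intro k r v h; simp [pvAcc] at h
  | succ f ih =>
    intro k r v h
    rw [pvAcc] at h
    by_cases he : ((pvLv k).filter (fun v => decide (v ≤ r))).isEmpty
    · rw [if_pos he] at h; simp at h
    · rw [if_neg he] at h
      simp only [List.mem_append, List.mem_filter, decide_eq_true_eq] at h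
      rcases h with ⟨h1, h2⟩ | h
      · exact ⟨h2, 0, by simpa using h1⟩
      · obtain ⟨hr, j, hj⟩ := ih (k+1) r v h
        exact ⟨hr, j+1, by rw [show k + (j+1) = k + 1 + j by omega]; exact hj⟩

lemma mem_pvAcc (f : Nat) : ∀ (k : Nat) (r : Int), r < 5 * 10 ^ (k + f) →
    ∀ v : Int, v ∈ pvAcc f k r ↔ (∃ j : Nat, v ∈ pvLv (k+j)) ∧ v ≤ r := by
  induction f with
  | zero =>
    intro k r hb v
    simp only [pvAcc, List.not_mem_nil, false_iff, not_and]
    rintro ⟨j, hj⟩ hv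
    have := (mem_pvLv (k+j) v).mp hj
    have hm : (10:Int) ^ k ≤ 10 ^ (k+j) := pvPow_mono (by omega)
    simp only [Nat.add_zero] at hb
    omega
  | succ f ih =>
    intro k r hb v
    rw [pvAcc]
    by_cases he : ((pvLv k).filter (fun v => decide (v ≤ r))).isEmpty
    · rw [if_pos he]
      simp only [List.not_mem_nil, false_iff, not_and]
      rintro ⟨j, hj⟩ hv
      have hch := pvAcc_empty_chain r k (List.isEmpty_iff.mp he) j
      rw [List.filter_eq_nil_iff] at hch
      exact absurd (by simpa using hv) (by simpa using hch v hj)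
    · rw [if_neg he]
      simp only [List.mem_append, List.mem_filter, decide_eq_true_eq]
      rw [ih (k+1) r (by rw [show k + 1 + f = k + (f+1) by omega]; exact hb) v]
      constructor
      · rintro (⟨h1, h2⟩ | ⟨⟨j, hj⟩, hr⟩)
        · exact ⟨⟨0, by simpa using h1⟩, h2⟩
        · exact ⟨⟨j+1, by rw [show k + (j+1) = k + 1 + j by omega]; exact hj⟩, hr⟩
      · rintro ⟨⟨j, hj⟩, hr⟩
        cases j with
        | zero => exact Or.inl ⟨by simpa using hj, hr⟩
        | succ j => exact Or.inr ⟨⟨j, by rw [show k + 1 + j = k + (j+1) by omega]; exact hj⟩, hr⟩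

lemma pvAcc_pairwise (f : Nat) : ∀ (k : Nat) (r : Int), (pvAcc f k r).Pairwise (· < ·) := by
  induction f with
  | zero => intro k r; simp [pvAcc]
  | succ f ih =>
    intro k r
    rw [pvAcc]
    by_cases he : ((pvLv k).filter (fun v => decide (v ≤ r))).isEmpty
    · rw [if_pos he]; simp
    · rw [if_neg he]
      rw [List.pairwise_append]
      refine ⟨(pvLv_pairwise k).filter _, ih (k+1) r, ?_⟩
      intro a ha b hb
      have ha' := (mem_pvLv k a).mp (List.mem_of_mem_filter ha)
      obtain ⟨_, j, hbj⟩ := pvAcc_sub f (k+1) r b hb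
      have hb' := (mem_pvLv (k+1+j) b).mp hbj
      have hm1 : (10:Int) ^ (k+1) ≤ 10 ^ (k+1+j) := pvPow_mono (by omega)
      have hm2 : (10:Int) ^ (k+1) = 10 * 10 ^ k := by ring
      have := pvPow_pos k
      omega


-- join of the digit strings, and nonnegativity of every parsed value
lemma pvJoin_nil (ls : List (List Char)) : PySem.Chars.join [] ls = ls.flatten := by
  induction ls with
  | nil => rfl
  | cons a t ih =>
    cases t with
    | nil => simp [PySem.Chars.join, List.intercalate]
    | cons b t2 =>
      simp only [PySem.Chars.join, List.intercalate, List.intersperse] at *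
      simpa using ih

lemma pvJoin_toList (j : List String) :
    (PySem.Str.join "" j).toList = (j.map String.toList).flatten := by
  show (String.ofList (PySem.Chars.join ("" : String).toList (j.map String.toList))).toList = _
  rw [show ("" : String).toList = [] from rfl, pvJoin_nil]
  simp

lemma pvProdA_chars (i : Nat) : ∀ j ∈ pvProdA i, ∀ c ∈ (PySem.Str.join "" j).toList,
    c = '0' ∨ c = '5' := by
  induction i with
  | zero =>
    intro j hj c hc
    simp only [pvProdA, List.mem_singleton] at hj
    subst hj
    rw [pvJoin_toList] at hc
    simp at hc
  | succ n ih =>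
    intro j hj c hc
    simp only [pvProdA, List.mem_flatMap, List.mem_map, List.mem_cons, List.mem_singleton,
      List.not_mem_nil, or_false] at hj
    obtain ⟨x, hx, rest, hrest, rfl⟩ := hj
    rw [pvJoin_toList] at hc
    simp only [List.map_cons, List.flatten_cons, List.mem_append] at hc
    rcases hc with hc | hc
    · rcases hx with rfl | rfl
      · left; simpa using hc
      · right; simpa using hc
    · exact ih rest hrest c (by rw [pvJoin_toList]; exact hc)

lemma pvF_nonneg (o : Option Nat) :
    0 ≤ (Option.map (fun n : Int => n) (o.bind (fun a => some ((a : Int))))).getD 0 := by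
  rcases o with _ | a <;> simp

lemma pvOfChars_nonneg (cs : List Char) (h : ∀ c ∈ cs, c = '0' ∨ c = '5') :
    0 ≤ (PySem.Int.ofChars? cs).getD 0 := by
  have hsub : ∀ c ∈ (List.dropWhile PySem.Int.isIntSpace
      (List.dropWhile PySem.Int.isIntSpace cs).reverse).reverse, c ∈ cs := by
    intro c hc
    rw [List.mem_reverse] at hc
    have h1 := (List.dropWhile_sublist (l := (List.dropWhile PySem.Int.isIntSpace cs).reverse)
      PySem.Int.isIntSpace).mem hc
    rw [List.mem_reverse] at h1
    exact (List.dropWhile_sublist PySem.Int.isIntSpace).mem h1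
  unfold PySem.Int.ofChars?
  rcases hE : (List.dropWhile PySem.Int.isIntSpace
      (List.dropWhile PySem.Int.isIntSpace cs).reverse).reverse with _ | ⟨c, ds⟩
  · exact pvF_nonneg _
  · rcases h c (hsub c (by rw [hE]; exact List.mem_cons_self ..)) with rfl | rfl <;>
      exact pvF_nonneg _

lemma pvJoinVal_nonneg (i : Nat) (j : List String) (hj : j ∈ pvProdA i) : 0 ≤ pvJoinVal j := by
  show 0 ≤ (PySem.Int.ofStr? (PySem.Str.join "" j)).getD 0
  rw [show PySem.Int.ofStr? (PySem.Str.join "" j)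
      = PySem.Int.ofChars? (PySem.Str.join "" j).toList from rfl]
  exact pvOfChars_nonneg _ (pvProdA_chars i j hj)

-- ===== the main equivalence =====
theorem pv_main (l r : Int) (hdom : Dom_solution l r) : solution l r = solution_alt l r := by
  have hdomr : -2147483648 ≤ r ∧ r ≤ 2147483648 := by
    unfold Dom_solution pvDomInt at hdom
    simp only [Bool.and_eq_true, decide_eq_true_eq] at hdom
    exact hdom.2
  -- ---- B's loop in closed form
  have hone : pvBLoop 12 r [0] [5] = [0, 5] ++ pvAcc 11 1 r := by
    have h2 : (([5] : List Int).flatMap (fun x => ([0, 5] : List Int).filterMap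
        (fun d => if 10*x + d ≤ r then some (10*x + d) else none)))
        = (pvLv 1).filter (fun v => decide (v ≤ r)) := by
      show (([0, 5] : List Int).filterMap
        (fun d => if 10*5 + d ≤ r then some (10*5 + d) else none)) ++ [] = _
      by_cases h50 : (50 : Int) ≤ r <;> by_cases h55 : (55 : Int) ≤ r <;>
        simp [pvLv, List.filterMap, List.filter, h50, h55]
    calc pvBLoop 12 r [0] [5]
        = pvBLoop 11 r ([0] ++ [5]) (([5] : List Int).flatMap (fun x => ([0, 5] : List Int).filterMap
            (fun d => if 10*x + d ≤ r then some (10*x + d) else none))) := by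
          rw [pvBLoop]; rw [if_neg (by decide)]
      _ = pvBLoop 11 r ([0] ++ [5]) ((pvLv 1).filter (fun v => decide (v ≤ r))) := by rw [h2]
      _ = pvBLoop 11 r [0, 5] ((pvLv 1).filter (fun v => decide (v ≤ r))) := rfl
      _ = [0, 5] ++ pvAcc 11 1 r := pvBLoop_acc 11 1 r [0, 5]
  have hB : solution_alt l r = (if (([0, 5] ++ pvAcc 11 1 r).filter
      (fun v => decide (l ≤ v) && decide (v ≤ r))).isEmpty then [-1]
      else ([0, 5] ++ pvAcc 11 1 r).filter (fun v => decide (l ≤ v) && decide (v ≤ r))) := by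
    show (if ((pvBLoop 12 r [0] [5]).filter (fun v => decide (l ≤ v) && decide (v ≤ r))).isEmpty
      then [-1] else (pvBLoop 12 r [0] [5]).filter (fun v => decide (l ≤ v) && decide (v ≤ r))) = _
    rw [hone]
  -- ---- A's folds in closed form
  have hstep : ∀ (s : PySem.Set Int) (i : Int),
      (pvProdA i.toNat).foldl (fun result j => let num : Int := pvJoinVal j;
        if l ≤ num ∧ num ≤ r then PySem.Set.add result num else result) s
      = PySem.Set.update s (((pvProdA i.toNat).map pvJoinVal).filter
          (fun v => decide (l ≤ v ∧ v ≤ r))) :=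
    fun s i => pvFoldl_addif (fun v => l ≤ v ∧ v ≤ r) pvJoinVal (pvProdA i.toNat) s
  have hA : solution l r = (if PySem.Set.ofList
      ((PySem.List.pyRange 1 (PySem.Str.len (PySem.Int.toStr r) + 1) 1).flatMap
        (fun i => ((pvProdA i.toNat).map pvJoinVal).filter (fun v => decide (l ≤ v ∧ v ≤ r)))) = []
      then [-1]
      else PySem.List.sorted (PySem.Set.ofList
        ((PySem.List.pyRange 1 (PySem.Str.len (PySem.Int.toStr r) + 1) 1).flatMap
          (fun i => ((pvProdA i.toNat).map pvJoinVal).filter (fun v => decide (l ≤ v ∧ v ≤ r)))))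
        (fun x => x) false) := by
    show (if ((PySem.List.pyRange 1 (PySem.Str.len (PySem.Int.toStr r) + 1) 1).foldl
        (fun result i => (pvProdA i.toNat).foldl (fun result j => let num : Int := pvJoinVal j;
          if l ≤ num ∧ num ≤ r then PySem.Set.add result num else result) result) PySem.Set.empty) = []
        then [-1]
        else PySem.List.sorted ((PySem.List.pyRange 1 (PySem.Str.len (PySem.Int.toStr r) + 1) 1).foldl
          (fun result i => (pvProdA i.toNat).foldl (fun result j => let num : Int := pvJoinVal j;
            if l ≤ num ∧ num ≤ r then PySem.Set.add result num else result) result) PySem.Set.empty)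
          (fun x => x) false) = _
    simp only [hstep]
    rw [pvFoldl_update (fun i => ((pvProdA i.toNat).map pvJoinVal).filter
      (fun v => decide (l ≤ v ∧ v ≤ r)))]
    rw [show (PySem.Set.empty : PySem.Set Int) = [] from rfl, PySem.Set.update_nil_left]
  by_cases hr0 : r < 0
  · -- everything is filtered away on both sides
    have hAe : ((PySem.List.pyRange 1 (PySem.Str.len (PySem.Int.toStr r) + 1) 1).flatMap
        (fun i => ((pvProdA i.toNat).map pvJoinVal).filter (fun v => decide (l ≤ v ∧ v ≤ r)))) = [] := by
      rw [List.eq_nil_iff_forall_not_mem]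
      intro v hv
      rw [List.mem_flatMap] at hv
      obtain ⟨i, _, hvf⟩ := hv
      rw [List.mem_filter] at hvf
      obtain ⟨hvm, hcond⟩ := hvf
      rw [List.mem_map] at hvm
      obtain ⟨j, hj, rfl⟩ := hvm
      have := pvJoinVal_nonneg i.toNat j hj
      simp only [decide_eq_true_eq] at hcond
      omega
    have hBe : (([0, 5] ++ pvAcc 11 1 r).filter
        (fun v => decide (l ≤ v) && decide (v ≤ r))) = [] := by
      rw [List.filter_eq_nil_iff]
      intro v hv
      simp only [Bool.and_eq_true, decide_eq_true_eq, not_and]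
      intro _
      rcases List.mem_append.mp hv with h01 | hacc
      · simp only [List.mem_cons, List.mem_singleton, List.not_mem_nil, or_false] at h01
        rcases h01 with rfl | rfl <;> omega
      · obtain ⟨hvr, j, hj⟩ := pvAcc_sub 11 1 r v hacc
        have := (mem_pvLv (1+j) v).mp hj
        have := pvPow_pos (1+j)
        omega
    rw [hA, hB, hAe, hBe]
    simp
  · -- r ≥ 0
    have hr : 0 ≤ r := not_lt.mp hr0
    have hd1 : 1 ≤ (Nat.toDigits 10 r.toNat).length := pvToDigits_pos r.toNat
    have hdle : (Nat.toDigits 10 r.toNat).length ≤ 10 := by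
      refine Nat.toDigits_length 10 r.toNat 10 (by norm_num) ?_
      have h1 : r.toNat ≤ 2147483648 := by omega
      calc r.toNat ≤ 2147483648 := h1
        _ < 10 ^ 10 := by norm_num
    have hrd : r < (10:Int) ^ (Nat.toDigits 10 r.toNat).length := by
      have h1 : r.toNat < 10 ^ (Nat.toDigits 10 r.toNat).length := pvToDigits_lb r.toNat
      have h2 := pvPow_castN (Nat.toDigits 10 r.toNat).length
      omega
    have hm : PySem.Str.len (PySem.Int.toStr r) = ((Nat.toDigits 10 r.toNat).length : Int) := by
      show ((PySem.Int.toStr r).toList.length : Int) = _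
      rw [PySem.Int.toList_toStr]
      show (((if r < 0 then '-' :: Nat.toDigits 10 r.natAbs else Nat.toDigits 10 r.toNat) :
        List Char).length : Int) = _
      rw [if_neg hr0]
    have hbig : (PySem.List.pyRange 1 (((Nat.toDigits 10 r.toNat).length : Int) + 1) 1).flatMap
          (fun i => ((pvProdA i.toNat).map pvJoinVal).filter (fun v => decide (l ≤ v ∧ v ≤ r)))
        = (List.range (Nat.toDigits 10 r.toNat).length).flatMap
          (fun k => (pvW (k+1)).filter (fun v => decide (l ≤ v ∧ v ≤ r))) := by
      rw [PySem.List.pyRange_one,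
        show (((Nat.toDigits 10 r.toNat).length : Int) + 1 - 1)
          = ((Nat.toDigits 10 r.toNat).length : Int) from by ring,
        Int.toNat_natCast, List.flatMap_map]
      exact List.flatMap_congr (fun k hk => by
        rw [List.mem_range] at hk
        rw [show ((1 : Int) + (k : Int)).toNat = k + 1 from by omega,
          pvProdA_vals (k+1) (by omega)])
    rw [hm, hbig] at hA
    have hfuel : r < 5 * 10 ^ (1 + 11 : Nat) := by
      have : (5 : Int) * 10 ^ (1 + 11 : Nat) = 5000000000000 := by norm_num
      omega
    -- membership characterizations
    have hres_mem : ∀ v, v ∈ (([0, 5] ++ pvAcc 11 1 r).filter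
        (fun v => decide (l ≤ v) && decide (v ≤ r)))
        ↔ (l ≤ v ∧ v ≤ r ∧ 0 ≤ v ∧ pvOk v.toNat = true) := by
      intro v
      rw [List.mem_filter]
      simp only [Bool.and_eq_true, decide_eq_true_eq]
      constructor
      · rintro ⟨hv, hl, hvr⟩
        refine ⟨hl, hvr, ?_⟩
        rcases List.mem_append.mp hv with h01 | hacc
        · simp only [List.mem_cons, List.mem_singleton, List.not_mem_nil, or_false] at h01
          rcases h01 with rfl | rfl <;> exact ⟨by norm_num, by decide⟩
        · obtain ⟨_, j, hj⟩ := pvAcc_sub 11 1 r v hacc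
          obtain ⟨hb1, hb2, hok⟩ := (mem_pvLv (1+j) v).mp hj
          have := pvPow_pos (1+j)
          exact ⟨by omega, hok⟩
      · rintro ⟨h1, h2, h3, h4⟩
        refine ⟨?_, h1, h2⟩
        rw [List.mem_append]
        by_cases hv0 : v = 0
        · left; simp [hv0]
        by_cases hv5 : v = 5
        · left; simp [hv5]
        right
        refine (mem_pvAcc 11 1 r hfuel v).mpr ⟨?_, h2⟩
        have hvn : v.toNat ≠ 0 := by omega
        have hk1 : 10 ^ Nat.log 10 v.toNat ≤ v.toNat := Nat.pow_log_le_self 10 hvn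
        have hk2 : v.toNat < 10 ^ (Nat.log 10 v.toNat + 1) :=
          Nat.lt_pow_succ_log_self (by norm_num) _
        rcases pvOk_top (Nat.log 10 v.toNat) v.toNat hk2 h4 with hlt | ⟨hge, hlt6⟩
        · omega
        · rcases hEk : Nat.log 10 v.toNat with _ | k'
          · exfalso
            rw [hEk] at hge hlt6
            simp only [pow_zero] at hge hlt6
            omega
          · rw [hEk] at hge hlt6
            refine ⟨k', (mem_pvLv (1+k') v).mpr ⟨?_, ?_, h4⟩⟩
            · rw [Nat.add_comm 1 k']
              have := pvPow_castN (k'+1)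
              omega
            · rw [Nat.add_comm 1 k']
              have hc1 := pvPow_castN (k'+1)
              have hc2 := pvPow_castN (k'+1+1)
              have he : (10:Nat) ^ (k'+1+1) = 10 * 10 ^ (k'+1) := by ring
              omega
    have hSA_mem : ∀ v, v ∈ PySem.Set.ofList
        ((List.range (Nat.toDigits 10 r.toNat).length).flatMap
          (fun k => (pvW (k+1)).filter (fun v => decide (l ≤ v ∧ v ≤ r))))
        ↔ (l ≤ v ∧ v ≤ r ∧ 0 ≤ v ∧ pvOk v.toNat = true) := by
      intro v
      rw [PySem.Set.mem_ofList, List.mem_flatMap]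
      constructor
      · rintro ⟨k, hk, hvf⟩
        rw [List.mem_filter] at hvf
        obtain ⟨hw, hcond⟩ := hvf
        obtain ⟨h0, _, hok⟩ := (mem_pvW (k+1) v).mp hw
        simp only [decide_eq_true_eq] at hcond
        exact ⟨hcond.1, hcond.2, h0, hok⟩
      · rintro ⟨h1, h2, h3, h4⟩
        refine ⟨(Nat.toDigits 10 r.toNat).length - 1, by rw [List.mem_range]; omega, ?_⟩
        rw [List.mem_filter]
        refine ⟨(mem_pvW _ v).mpr ⟨h3, ?_, h4⟩, by simp only [decide_eq_true_eq]; exact ⟨h1, h2⟩⟩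
        rw [show (Nat.toDigits 10 r.toNat).length - 1 + 1
          = (Nat.toDigits 10 r.toNat).length from by omega]
        omega
    -- assemble
    have hresPW : (([0, 5] ++ pvAcc 11 1 r).filter
        (fun v => decide (l ≤ v) && decide (v ≤ r))).Pairwise (· < ·) := by
      apply List.Pairwise.filter
      rw [List.pairwise_append]
      refine ⟨by simp, pvAcc_pairwise 11 1 r, ?_⟩
      intro a ha b hb
      obtain ⟨_, j, hj⟩ := pvAcc_sub 11 1 r b hb
      obtain ⟨hb1, _, _⟩ := (mem_pvLv (1+j) b).mp hj
      have hmono : (10:Int) ^ (1:Nat) ≤ 10 ^ (1+j) := pvPow_mono (by omega)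
      have h10 : (10:Int) ^ (1:Nat) = 10 := by norm_num
      simp only [List.mem_cons, List.mem_singleton, List.not_mem_nil, or_false] at ha
      rcases ha with rfl | rfl <;> omega
    have hresND : (([0, 5] ++ pvAcc 11 1 r).filter
        (fun v => decide (l ≤ v) && decide (v ≤ r))).Nodup :=
      hresPW.imp (fun h => ne_of_lt h)
    have hperm : (([0, 5] ++ pvAcc 11 1 r).filter
        (fun v => decide (l ≤ v) && decide (v ≤ r))).Perm (PySem.Set.ofList
        ((List.range (Nat.toDigits 10 r.toNat).length).flatMap
          (fun k => (pvW (k+1)).filter (fun v => decide (l ≤ v ∧ v ≤ r))))) :=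
      (List.perm_ext_iff_of_nodup hresND (PySem.Set.nodup_ofList _)).mpr
        (fun v => (hres_mem v).trans (hSA_mem v).symm)
    have hsorted := PySem.List.sorted_eq_of_perm_of_pairwise_lt
      (PySem.Set.ofList ((List.range (Nat.toDigits 10 r.toNat).length).flatMap
        (fun k => (pvW (k+1)).filter (fun v => decide (l ≤ v ∧ v ≤ r)))))
      (([0, 5] ++ pvAcc 11 1 r).filter (fun v => decide (l ≤ v) && decide (v ≤ r)))
      (fun x => x) hperm hresPW
    rw [hA, hB]
    by_cases hS : (PySem.Set.ofList ((List.range (Nat.toDigits 10 r.toNat).length).flatMap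
        (fun k => (pvW (k+1)).filter (fun v => decide (l ≤ v ∧ v ≤ r)))) : List Int) = []
    · rw [if_pos hS, if_pos (by rw [List.isEmpty_iff]; exact List.Perm.eq_nil (hS ▸ hperm))]
    · rw [if_neg hS, if_neg ?_, hsorted]
      rw [List.isEmpty_iff]
      intro hre
      exact hS (List.Perm.eq_nil (hre ▸ hperm).symm)

-- ===== VERDICT (by name: the statement is the Claim_ definition above) =====
theorem solution_spec : Claim_equal_solution := by
  intro l r hdom
  show solution l r = solution_alt l r
  exact pv_main l r hdom
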